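-- pv_equiv track=rewrite | github.com/Korozin/WiiU-CodeSender | src/CodeSender.py | Format_Code
-- ===== SOURCE A (Python) =====
-- def Format_Code(code):
--     input_string = code.replace(" ", "").replace("\n", "")
--     output_string = ""
--     for i, c in enumerate(input_string):
--         if i % 17 == 16:
--             output_string += c + "\n"
--         else:
--             output_string += c
--
--     new_output_string = []
--     for i, line in enumerate(output_string.split("\n")):
--         if line.startswith("#"):
--             new_output_string.append("#" + line[1:9] + " " + line[9:])
--         elif line:
--             new_output_string.append(line[:8] + " " + line[8:])
--
--     return "\n".join(new_output_string).upper()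
-- ===== SOURCE B (Python) =====
-- def Format_Code(code):
--     s = code.replace(" ", "").replace("\n", "")
--     lines = []
--     while s:
--         chunk = s[:17]
--         if chunk.startswith("#"):
--             lines.append("#" + chunk[1:9] + " " + chunk[9:])
--         else:
--             lines.append(chunk[:8] + " " + chunk[8:])
--         s = s[17:]
--     return "\n".join(lines).upper()
-- ===== Notes on version B (the rewrite author's own statement) =====
-- stated objective: simpler
-- what changed: B replaces A's three passes (char-by-char building of a newline-delimited string, splitting it back on newlines, and re-formatting each line) with a single while loop that peels 17-char chunks off the cleaned string and formats each chunk directly.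
import Mathlib
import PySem

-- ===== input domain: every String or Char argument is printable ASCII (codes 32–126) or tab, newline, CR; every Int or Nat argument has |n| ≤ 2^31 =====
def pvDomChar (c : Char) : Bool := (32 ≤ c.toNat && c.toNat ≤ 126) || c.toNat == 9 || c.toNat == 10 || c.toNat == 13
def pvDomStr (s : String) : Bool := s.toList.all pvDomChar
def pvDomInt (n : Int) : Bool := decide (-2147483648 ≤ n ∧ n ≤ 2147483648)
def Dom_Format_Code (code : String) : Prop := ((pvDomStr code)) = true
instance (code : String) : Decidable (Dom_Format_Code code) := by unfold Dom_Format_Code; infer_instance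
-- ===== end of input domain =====

-- B replaces A's three passes (insert '\n' every 17 chars, split on '\n', re-format each
-- line) by one pass that peels off 17-char chunks directly; same return value, objective: simpler.

-- ===== PORT A =====
-- literal transliteration of A: build a '\n'-separated string char by char, split it, format each line
def Format_Code (code : String) : String :=
  let input_string : List Char :=
    (PySem.Str.replace (PySem.Str.replace code " " "") "\n" "").toList
  let output_string : List Char :=
    (PySem.List.enumerate input_string 0).foldl
      (fun acc ic =>
        if PySem.Int.mod ic.1 17 == 16 then acc ++ [ic.2, '\n'] else acc ++ [ic.2]) []
  let new_output_string : List (List Char) :=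
    (PySem.List.enumerate (PySem.Chars.splitOn output_string ['\n']) 0).foldl
      (fun acc il =>
        if PySem.Chars.startswith il.2 ['#'] then
          acc ++ ['#' :: (PySem.List.slice il.2 (some 1) (some 9) ++ ' ' :: PySem.List.slice il.2 (some 9) none)]
        else if il.2 ≠ [] then
          acc ++ [PySem.List.slice il.2 none (some 8) ++ ' ' :: PySem.List.slice il.2 (some 8) none]
        else acc) []
  String.ofList (PySem.Chars.upper (PySem.Chars.join ['\n'] new_output_string))

-- ===== PORT B =====
-- the while loop of Source B: peel off 17-char chunks (s[:17] = take 17, s[17:] = drop 17 — exact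
-- for these nonnegative slice bounds) and format each chunk directly
def pvChunksB (s : List Char) : List (List Char) :=
  if h : s = [] then []
  else
    let chunk := s.take 17
    (if PySem.Chars.startswith chunk ['#'] then
      '#' :: ((chunk.drop 1).take 8 ++ ' ' :: chunk.drop 9)
    else
      chunk.take 8 ++ ' ' :: chunk.drop 8) :: pvChunksB (s.drop 17)
termination_by s.length
decreasing_by
  have : s.length ≠ 0 := fun hl => h (List.eq_nil_of_length_eq_zero hl)
  simp [List.length_drop]; omega

def Format_Code_alt (code : String) : String :=
  let s : List Char :=
    (PySem.Str.replace (PySem.Str.replace code " " "") "\n" "").toList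
  String.ofList (PySem.Chars.upper (PySem.Chars.join ['\n'] (pvChunksB s)))

-- ===== PRECONDITION & SPEC =====
def Spec_Format_Code (code : String) (out : String) : Prop := out = Format_Code_alt code
instance (code : String) (out : String) : Decidable (Spec_Format_Code code out) := by unfold Spec_Format_Code; infer_instance

-- ===== CLAIM (what is proved, stated in full; the proofs are below) =====
def Claim_equal_Format_Code : Prop := ∀ (code : String), Dom_Format_Code code → Spec_Format_Code code (Format_Code code)

-- ===== LEMMAS AND PROOFS =====

-- the body of A's first loop, as a flatMap step
def pvG (ic : Int × Char) : List Char :=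
  if PySem.Int.mod ic.1 17 == 16 then [ic.2, '\n'] else [ic.2]

-- the body of A's second loop, as a flatMap step
def pvH (line : List Char) : List (List Char) :=
  if PySem.Chars.startswith line ['#'] then
    ['#' :: (PySem.List.slice line (some 1) (some 9) ++ ' ' :: PySem.List.slice line (some 9) none)]
  else if line ≠ [] then
    [PySem.List.slice line none (some 8) ++ ' ' :: PySem.List.slice line (some 8) none]
  else []

-- replace s [c] [] produces no c
theorem pv_replace_go_not_mem (c : Char) :
    ∀ (fuel : Nat) (l acc : List Char), l.length ≤ fuel → c ∉ acc →
      c ∉ PySem.Chars.replace.go [c] [] fuel l acc := by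
  intro fuel
  induction fuel with
  | zero =>
    intro l acc hl hacc
    have : l = [] := List.eq_nil_of_length_eq_zero (Nat.le_zero.mp hl)
    subst this
    simp [PySem.Chars.replace.go, hacc]
  | succ f ih =>
    intro l acc hl hacc
    match l with
    | [] => simp [PySem.Chars.replace.go, hacc]
    | ch :: t =>
      by_cases hc : ch = c
      · subst hc
        simp only [PySem.Chars.replace.go, List.isPrefixOf]
        rw [if_pos (by simp)]
        exact ih _ _ (by simp at hl ⊢; omega) hacc
      · simp only [PySem.Chars.replace.go, List.isPrefixOf]
        rw [if_neg (by simp [Ne.symm hc])]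
        refine ih _ _ (by simp at hl ⊢; omega) ?_
        simp [hacc, Ne.symm hc]

theorem pv_replace_not_mem (s : List Char) (c : Char) :
    c ∉ PySem.Chars.replace s [c] [] := by
  have : PySem.Chars.replace s [c] [] = PySem.Chars.replace.go [c] [] s.length s [] := by
    simp [PySem.Chars.replace]
  rw [this]
  exact pv_replace_go_not_mem c s.length s [] le_rfl (by simp)

-- splitOn.go : the accumulator comes out in front
theorem pv_splitOn_go_acc (sep : List Char) :
    ∀ (fuel : Nat) (l cur : List Char) (acc : List (List Char)),
      PySem.Chars.splitOn.go sep fuel l cur acc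
        = acc.reverse ++ PySem.Chars.splitOn.go sep fuel l cur [] := by
  intro fuel
  induction fuel with
  | zero => intro l cur acc; simp [PySem.Chars.splitOn.go]
  | succ f ih =>
    intro l cur acc
    match l with
    | [] => simp [PySem.Chars.splitOn.go]
    | c :: rest =>
      by_cases hp : sep.isPrefixOf (c :: rest)
      · simp only [PySem.Chars.splitOn.go, hp, if_pos]
        rw [ih _ _ (cur.reverse :: acc), ih _ _ [cur.reverse]]
        simp
      · simp only [PySem.Chars.splitOn.go, hp, Bool.false_eq_true, ite_false]
        rw [ih rest (c :: cur) acc]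

-- splitOn.go on a '\n'-free remainder
theorem pv_splitOn_go_free :
    ∀ (l : List Char) (fuel : Nat) (cur : List Char) (acc : List (List Char)),
      '\n' ∉ l → l.length ≤ fuel →
      PySem.Chars.splitOn.go ['\n'] fuel l cur acc = ((cur.reverse ++ l) :: acc).reverse := by
  intro l
  induction l with
  | nil =>
    intro fuel cur acc h hl
    match fuel with
    | 0 => simp [PySem.Chars.splitOn.go]
    | f + 1 => simp [PySem.Chars.splitOn.go]
  | cons c rest ih =>
    intro fuel cur acc h hl
    match fuel with
    | f + 1 =>
      have hc : c ≠ '\n' := fun hce => h (by simp [hce])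
      have hp : ¬ (['\n'].isPrefixOf (c :: rest) = true) := by simp [List.isPrefixOf, Ne.symm hc]
      simp only [PySem.Chars.splitOn.go, hp, Bool.false_eq_true, ite_false]
      rw [ih f (c :: cur) acc (fun hm => h (by simp [hm])) (by simp at hl ⊢; omega)]
      simp

-- splitOn.go past a '\n'-free prefix and one separator
theorem pv_splitOn_go_step :
    ∀ (a : List Char) (b : List Char) (fuel : Nat) (cur : List Char) (acc : List (List Char)),
      '\n' ∉ a →
      PySem.Chars.splitOn.go ['\n'] (fuel + a.length + 1) (a ++ '\n' :: b) cur acc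
        = PySem.Chars.splitOn.go ['\n'] fuel b [] ((cur.reverse ++ a) :: acc) := by
  intro a
  induction a with
  | nil =>
    intro b fuel cur acc h
    have hp : (['\n'].isPrefixOf ('\n' :: b)) = true := by simp [List.isPrefixOf]
    simp only [List.length_nil, Nat.add_zero, List.nil_append, PySem.Chars.splitOn.go, hp, if_pos]
    simp
  | cons c rest ih =>
    intro b fuel cur acc h
    have hc : c ≠ '\n' := fun hce => h (by simp [hce])
    have hp : ¬ (['\n'].isPrefixOf (c :: (rest ++ '\n' :: b)) = true) := by
      simp [List.isPrefixOf, Ne.symm hc]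
    have : fuel + (c :: rest).length + 1 = (fuel + rest.length + 1) + 1 := by simp; omega
    rw [this]
    simp only [List.cons_append, PySem.Chars.splitOn.go, hp, Bool.false_eq_true, ite_false]
    rw [ih b fuel (c :: cur) acc (fun hm => h (by simp [hm]))]
    simp

theorem pv_splitOn_free (l : List Char) (h : '\n' ∉ l) :
    PySem.Chars.splitOn l ['\n'] = [l] := by
  rw [PySem.Chars.splitOn, pv_splitOn_go_free l (l.length + 1) [] [] h (by omega)]
  simp

theorem pv_splitOn_sep (a b : List Char) (h : '\n' ∉ a) :
    PySem.Chars.splitOn (a ++ '\n' :: b) ['\n'] = a :: PySem.Chars.splitOn b ['\n'] := by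
  have hlen : (a ++ '\n' :: b).length + 1 = (b.length + 1) + a.length + 1 := by simp; omega
  rw [PySem.Chars.splitOn, hlen, pv_splitOn_go_step a b (b.length + 1) [] [] h]
  rw [pv_splitOn_go_acc ['\n'] (b.length + 1) b [] [([] : List Char).reverse ++ a]]
  simp [PySem.Chars.splitOn]

-- flatMap pvG over a stretch with no index ≡ 16 (mod 17) copies the characters
theorem pv_flatMap_g_free :
    ∀ (t : List Char) (k : Int), (∀ j : Nat, j < t.length → PySem.Int.mod (k + j) 17 ≠ 16) →
      (PySem.List.enumerate t k).flatMap pvG = t := by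
  intro t
  induction t with
  | nil => intro k h; simp [PySem.List.enumerate]
  | cons c rest ih =>
    intro k h
    rw [PySem.List.enumerate_cons]
    rw [List.flatMap_cons]
    have h0 : PySem.Int.mod k 17 ≠ 16 := by
      have := h 0 (by simp)
      simpa using this
    have h0' : ¬ k % 17 = 16 := by
      rw [PySem.Int.mod_eq_emod_of_pos (by omega : (0:Int) < 17)] at h0; exact h0
    have : pvG (k, c) = [c] := by simp [pvG, h0']
    rw [this, ih (k + 1) (fun j hj => by
      have := h (j + 1) (by simp; omega)
      push_cast at this ⊢
      rw [show k + 1 + (j : Int) = k + ((j : Int) + 1) by ring]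
      exact this)]
    simp

-- one 17-chunk of A's first loop
theorem pv_flatMap_g_chunk (s : List Char) (k : Int) (hk : 0 ≤ k) (hm : PySem.Int.mod k 17 = 0)
    (hlen : 17 ≤ s.length) :
    (PySem.List.enumerate s k).flatMap pvG
      = s.take 17 ++ '\n' :: (PySem.List.enumerate (s.drop 17) (k + 17)).flatMap pvG := by
  have hmod : k % 17 = 0 := by
    rw [PySem.Int.mod_eq_emod_of_pos (by omega : (0:Int) < 17)] at hm; exact hm
  have h16 : 16 < s.length := by omega
  have hsplit : s = s.take 16 ++ (s[16] :: s.drop 17) := by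
    conv_lhs => rw [← List.take_append_drop 16 s]
    rw [List.drop_eq_getElem_cons h16]
  conv_lhs => rw [hsplit]
  rw [PySem.List.enumerate_append, List.flatMap_append]
  have hlt16 : (s.take 16).length = 16 := by simp; omega
  rw [pv_flatMap_g_free (s.take 16) k (fun j hj => by
    rw [hlt16] at hj
    rw [PySem.Int.mod_eq_emod_of_pos (by omega : (0:Int) < 17)]
    omega)]
  rw [PySem.List.enumerate_cons, List.flatMap_cons]
  have hg : pvG (k + (s.take 16).length, s[16]) = [s[16], '\n'] := by
    rw [hlt16]
    simp only [pvG]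
    rw [PySem.Int.mod_eq_emod_of_pos (by omega : (0:Int) < 17)]
    have h163 : (k + (16:Int)) % 17 = 16 := by omega
    simp [h163]
  rw [hg]
  have htk : s.take 17 = s.take 16 ++ [s[16]] := by
    rw [show 17 = 16 + 1 from rfl, List.take_add_one]
    simp [List.getElem?_eq_getElem h16]
  have : k + ((s.take 16).length : Int) + 1 = k + 17 := by rw [hlt16]; push_cast; ring
  rw [this]
  conv_rhs => rw [htk]
  simp only [List.append_assoc, List.cons_append, List.nil_append]

-- A's line formatting agrees with B's chunk formatting on nonempty lines
theorem pv_fmt_eq (line : List Char) (h : line ≠ []) :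
    pvH line = [if PySem.Chars.startswith line ['#'] then
        '#' :: ((line.drop 1).take 8 ++ ' ' :: line.drop 9)
      else line.take 8 ++ ' ' :: line.drop 8] := by
  by_cases hs : PySem.Chars.startswith line ['#']
  · simp only [pvH, hs, if_pos]
    have h19 : PySem.List.slice line (some 1) (some 9) = (line.drop 1).take 8 := by
      have := PySem.List.slice_natCast line 1 9
      simpa using this
    have h9 : PySem.List.slice line (some 9) none = line.drop 9 := by
      have := PySem.List.slice_from_natCast line 9
      simpa using this
    rw [h19, h9]
  · simp only [pvH, hs, Bool.false_eq_true, ite_false, h, ne_eq, not_false_eq_true, if_pos]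
    have h8 : PySem.List.slice line none (some 8) = line.take 8 := by
      have := PySem.List.slice_to_natCast line 8
      simpa using this
    have h8' : PySem.List.slice line (some 8) none = line.drop 8 := by
      have := PySem.List.slice_from_natCast line 8
      simpa using this
    rw [h8, h8']

-- the main induction: A's split-then-format equals B's chunk loop
theorem pv_main :
    ∀ (n : Nat) (s : List Char), s.length ≤ n → ∀ (k : Int), 0 ≤ k → PySem.Int.mod k 17 = 0 →
      '\n' ∉ s →
      (PySem.Chars.splitOn ((PySem.List.enumerate s k).flatMap pvG) ['\n']).flatMap pvH
        = pvChunksB s := by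
  intro n
  induction n with
  | zero =>
    intro s hl k hk hm hnl
    have hs : s = [] := List.eq_nil_of_length_eq_zero (Nat.le_zero.mp hl)
    subst hs
    rw [show (PySem.List.enumerate ([] : List Char) k).flatMap pvG = [] from rfl]
    rw [pv_splitOn_free [] (by simp)]
    simp [pvH, pvChunksB, PySem.Chars.startswith, List.isPrefixOf]
  | succ n ih =>
    intro s hl k hk hm hnl
    have hmod : k % 17 = 0 := by
      rw [PySem.Int.mod_eq_emod_of_pos (by omega : (0:Int) < 17)] at hm; exact hm
    by_cases hbig : 17 ≤ s.length
    · -- one full chunk then recurse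
      have hne : s ≠ [] := by intro h; subst h; simp at hbig
      rw [pv_flatMap_g_chunk s k hk hm hbig]
      rw [pv_splitOn_sep _ _ (fun hmem => hnl (List.mem_of_mem_take hmem))]
      rw [List.flatMap_cons]
      have hm' : PySem.Int.mod (k + 17) 17 = 0 := by
        rw [PySem.Int.mod_eq_emod_of_pos (by omega : (0:Int) < 17)]; omega
      have hlen' : (s.drop 17).length ≤ n := by rw [List.length_drop]; omega
      rw [ih (s.drop 17) hlen' (k + 17) (by omega) hm'
        (fun hmem => hnl (List.mem_of_mem_drop hmem))]
      have htl : (s.take 17).length = 17 := by rw [List.length_take]; omega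
      have htne : s.take 17 ≠ [] := by
        intro h; rw [h] at htl; simp at htl
      rw [pv_fmt_eq (s.take 17) htne]
      conv_rhs => rw [pvChunksB]
      rw [dif_neg hne, List.singleton_append]
    · -- final short chunk
      have hsmall : s.length < 17 := by omega
      rw [pv_flatMap_g_free s k (fun j hj => by
        rw [PySem.Int.mod_eq_emod_of_pos (by omega : (0:Int) < 17)]
        omega)]
      rw [pv_splitOn_free s hnl]
      by_cases hs : s = []
      · subst hs
        simp [pvH, pvChunksB, PySem.Chars.startswith, List.isPrefixOf]
      · rw [List.flatMap_cons, List.flatMap_nil, List.append_nil, pv_fmt_eq s hs]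
        conv_rhs => rw [pvChunksB]
        rw [dif_neg hs]
        have ht : s.take 17 = s := List.take_of_length_le (by omega)
        have hd : s.drop 17 = [] := List.drop_eq_nil_of_le (by omega)
        rw [pvChunksB]
        simp [ht, hd]

-- the two ports agree on every input
theorem pv_format_code_eq (code : String) : Format_Code code = Format_Code_alt code := by
  simp only [Format_Code, Format_Code_alt]
  set input : List Char := (PySem.Str.replace (PySem.Str.replace code " " "") "\n" "").toList with hinput
  have hnl : '\n' ∉ input := by
    rw [hinput, PySem.Str.replace, String.toList_ofList]
    have h1 : ("\n" : String).toList = ['\n'] := rfl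
    have h2 : ("" : String).toList = [] := rfl
    rw [h1, h2]
    exact pv_replace_not_mem _ '\n'
  have h1 : (PySem.List.enumerate input 0).foldl
      (fun acc ic =>
        if PySem.Int.mod ic.1 17 == 16 then acc ++ [ic.2, '\n'] else acc ++ [ic.2]) []
      = (PySem.List.enumerate input 0).flatMap pvG := by
    have hf : (fun (acc : List Char) (ic : Int × Char) =>
        if PySem.Int.mod ic.1 17 == 16 then acc ++ [ic.2, '\n'] else acc ++ [ic.2])
        = (fun acc ic => acc ++ pvG ic) := by
      funext acc ic
      simp only [pvG]
      split <;> rfl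
    rw [hf, PySem.List.foldl_append_eq_flatMap]
    simp
  rw [h1]
  set lines := PySem.Chars.splitOn ((PySem.List.enumerate input 0).flatMap pvG) ['\n'] with hlines
  have h2 : (PySem.List.enumerate lines 0).foldl
      (fun acc il =>
        if PySem.Chars.startswith il.2 ['#'] then
          acc ++ ['#' :: (PySem.List.slice il.2 (some 1) (some 9) ++ ' ' :: PySem.List.slice il.2 (some 9) none)]
        else if il.2 ≠ [] then
          acc ++ [PySem.List.slice il.2 none (some 8) ++ ' ' :: PySem.List.slice il.2 (some 8) none]
        else acc) []
      = lines.flatMap pvH := by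
    have hf : (fun (acc : List (List Char)) (il : Int × List Char) =>
        if PySem.Chars.startswith il.2 ['#'] then
          acc ++ ['#' :: (PySem.List.slice il.2 (some 1) (some 9) ++ ' ' :: PySem.List.slice il.2 (some 9) none)]
        else if il.2 ≠ [] then
          acc ++ [PySem.List.slice il.2 none (some 8) ++ ' ' :: PySem.List.slice il.2 (some 8) none]
        else acc)
        = (fun acc il => acc ++ pvH il.2) := by
      funext acc il
      simp only [pvH]
      split
      · rfl
      · split <;> simp
    rw [hf, PySem.List.foldl_append_eq_flatMap]
    have : lines.flatMap pvH = ((PySem.List.enumerate lines 0).map (fun x => x.2)).flatMap pvH := by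
      rw [PySem.List.map_snd_enumerate]
    rw [this, List.flatMap_map]
    simp
  rw [h2, hlines, pv_main input.length input le_rfl 0 le_rfl (by decide) hnl]

-- ===== VERDICT (by name: the statement is the Claim_ definition above) =====
theorem Format_Code_spec : Claim_equal_Format_Code := by
  intro code _
  unfold Spec_Format_Code
  exact pv_format_code_eq code
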